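-- pv_equiv track=rewrite | github.com/megyoung430/magnitude-bandit-analysis | src/behavior_analysis/get_variables_across_sessions.py | merge_blocks_across_sessions
-- ===== SOURCE A (Python) =====
-- def merge_blocks_across_sessions(blocks_by_session):
--     """
--     blocks_by_session: list of lists like
--       [[1,1,1,2,2], [1,1,2,2,3,3,3], ...]
--
--     Returns one list where block IDs continue across sessions.
--     """
--     merged = []
--     offset = 0
--     for blocks in blocks_by_session:
--         if not blocks:
--             continue
--         shifted = [b + offset for b in blocks]
--         merged.extend(shifted)
--         offset = merged[-1] - 1
--     return merged
-- ===== SOURCE B (Python) =====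
-- def merge_blocks_across_sessions(blocks_by_session):
--     # Pass 1: starting offset per nonempty session (prefix accumulation of last-1).
--     sessions = [s for s in blocks_by_session if s]
--     offsets = [0]
--     for s in sessions[:-1]:
--         offsets.append(offsets[-1] + s[-1] - 1)
--     # Pass 2: flatten, shifting each session by its precomputed offset.
--     out = []
--     for s, off in zip(sessions, offsets):
--         out.extend(b + off for b in s)
--     return out
-- ===== Notes on version B (the rewrite author's own statement) =====
-- stated objective: alternative
-- what changed: Replaced the single stateful loop (offset updated from merged[-1] after each extend) by two separate passes: one that precomputes the list of per-session starting offsets by accumulating last-element-minus-one over nonempty sessions, and a second that zips sessions with their offsets and flattens.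
import Mathlib
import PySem

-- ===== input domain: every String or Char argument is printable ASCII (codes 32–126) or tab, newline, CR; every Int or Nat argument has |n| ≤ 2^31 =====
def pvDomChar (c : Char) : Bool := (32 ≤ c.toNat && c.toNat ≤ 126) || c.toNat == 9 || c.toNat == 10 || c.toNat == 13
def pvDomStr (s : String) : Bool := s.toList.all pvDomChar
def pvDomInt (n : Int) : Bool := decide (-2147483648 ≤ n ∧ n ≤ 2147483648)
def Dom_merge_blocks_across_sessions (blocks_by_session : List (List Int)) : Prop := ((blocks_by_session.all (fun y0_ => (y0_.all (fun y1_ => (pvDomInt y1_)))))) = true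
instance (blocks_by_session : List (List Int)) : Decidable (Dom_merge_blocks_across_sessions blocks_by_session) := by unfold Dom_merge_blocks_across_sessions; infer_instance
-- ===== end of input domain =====

-- B replaces A's single stateful loop by two passes: precompute per-session starting
-- offsets (prefix accumulation of last-element-minus-one over nonempty sessions),
-- then zip-and-flatten; objective: alternative decomposition, same cost.

-- ===== PORT A =====
def merge_blocks_across_sessions (blocks_by_session : List (List Int)) : List Int :=
  (blocks_by_session.foldl
    (fun (st : List Int × Int) blocks =>
      if blocks = [] then st
      else
        let shifted := blocks.map (fun b => b + st.2)
        let merged := st.1 ++ shifted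
        (merged, (PySem.List.pyGet? merged (-1)).getD 0 - 1))
    (([] : List Int), (0 : Int))).1

-- ===== PORT B =====
def merge_blocks_across_sessions_alt (blocks_by_session : List (List Int)) : List Int :=
  let sessions := blocks_by_session.filter (fun s => decide (s ≠ []))
  let offsets := sessions.dropLast.foldl
    (fun offs s =>
      offs ++ [(PySem.List.pyGet? offs (-1)).getD 0 + (PySem.List.pyGet? s (-1)).getD 0 - 1])
    [(0 : Int)]
  (sessions.zip offsets).foldl (fun out p => out ++ p.1.map (fun b => b + p.2)) []

-- ===== PRECONDITION & SPEC =====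
def Spec_merge_blocks_across_sessions (blocks_by_session : List (List Int)) (out : List Int) : Prop := out = merge_blocks_across_sessions_alt blocks_by_session
instance (blocks_by_session : List (List Int)) (out : List Int) : Decidable (Spec_merge_blocks_across_sessions blocks_by_session out) := by unfold Spec_merge_blocks_across_sessions; infer_instance

-- ===== CLAIM (what is proved, stated in full; the proofs are below) =====
def Claim_equal_merge_blocks_across_sessions : Prop := ∀ (blocks_by_session : List (List Int)), Dom_merge_blocks_across_sessions blocks_by_session → Spec_merge_blocks_across_sessions blocks_by_session (merge_blocks_across_sessions blocks_by_session)

-- ===== LEMMAS AND PROOFS =====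

/-- The `xs[-1]` (with default) both programs use. -/
def pvLastD (xs : List Int) : Int := (PySem.List.pyGet? xs (-1)).getD 0

/-- Reference function both ports are reduced to. -/
def pvSpec : List (List Int) → Int → List Int
  | [], _ => []
  | s :: rest, off =>
    if s = [] then pvSpec rest off
    else s.map (fun b => b + off) ++ pvSpec rest (pvLastD s + off - 1)

theorem pvLastD_concat (p : List Int) (w : Int) : pvLastD (p ++ [w]) = w := by
  simp [pvLastD, PySem.List.pyGet?_neg_one]

theorem pvLastD_append_map (m s : List Int) (off : Int) (h : s ≠ []) :
    pvLastD (m ++ s.map (fun b => b + off)) = pvLastD s + off := by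
  rcases (List.eq_nil_or_concat s) with rfl | ⟨s', x, rfl⟩
  · exact absurd rfl h
  · simp only [List.concat_eq_append]
    have : m ++ (s' ++ [x]).map (fun b => b + off) = (m ++ s'.map (fun b => b + off)) ++ [x + off] := by
      simp
    rw [this, pvLastD_concat, pvLastD_concat]

theorem pvFoldA (bbs : List (List Int)) : ∀ (m : List Int) (off : Int),
    (bbs.foldl
      (fun (st : List Int × Int) blocks =>
        if blocks = [] then st
        else
          let shifted := blocks.map (fun b => b + st.2)
          let merged := st.1 ++ shifted
          (merged, (PySem.List.pyGet? merged (-1)).getD 0 - 1))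
      (m, off)).1 = m ++ pvSpec bbs off := by
  induction bbs with
  | nil => intro m off; simp [pvSpec]
  | cons s rest ih =>
    intro m off
    by_cases hs : s = []
    · simp only [List.foldl_cons, if_pos hs, pvSpec, ih]
    · simp only [List.foldl_cons, if_neg hs]
      show (List.foldl _ (m ++ s.map (fun b => b + off),
        (PySem.List.pyGet? (m ++ s.map (fun b => b + off)) (-1)).getD 0 - 1) rest).1 = _
    -- the updated offset is lastD s + off - 1
      have hl : (PySem.List.pyGet? (m ++ s.map (fun b => b + off)) (-1)).getD 0 = pvLastD s + off := by
        have := pvLastD_append_map m s off hs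
        simpa [pvLastD] using this
      rw [hl, ih]
      simp [pvSpec, if_neg hs]

theorem pvSpec_filter (bbs : List (List Int)) : ∀ off : Int,
    pvSpec (bbs.filter (fun s => decide (s ≠ []))) off = pvSpec bbs off := by
  induction bbs with
  | nil => intro off; rfl
  | cons s rest ih =>
    intro off
    by_cases hs : s = []
    · have hd : (decide (s ≠ []) : Bool) = false := by simp [hs]
      rw [List.filter_cons, hd]
      simp only [Bool.false_eq_true, if_false]
      rw [ih, show pvSpec (s :: rest) off = pvSpec rest off from by simp [pvSpec, hs]]
    · have hd : (decide (s ≠ []) : Bool) = true := by simp [hs]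
      rw [List.filter_cons, hd, if_pos rfl]
      show pvSpec (s :: _) off = _
      simp only [pvSpec, if_neg hs]
      rw [ih]

/-- The offset-table fold ignores the prefix before its last element. -/
theorem pvOffsShift (l : List (List Int)) : ∀ (p : List Int) (w : Int),
    List.foldl
      (fun offs s =>
        offs ++ [(PySem.List.pyGet? offs (-1)).getD 0 + (PySem.List.pyGet? s (-1)).getD 0 - 1])
      (p ++ [w]) l
    = p ++ List.foldl
      (fun offs s =>
        offs ++ [(PySem.List.pyGet? offs (-1)).getD 0 + (PySem.List.pyGet? s (-1)).getD 0 - 1])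
      [w] l := by
  induction l with
  | nil => intro p w; simp
  | cons s rest ih =>
    intro p w
    simp only [List.foldl_cons]
    have hp : (PySem.List.pyGet? (p ++ [w]) (-1)).getD 0 = w := pvLastD_concat p w
    have hw : (PySem.List.pyGet? ([w] : List Int) (-1)).getD 0 = w := by
      simpa using pvLastD_concat [] w
    rw [hp, hw]
    rw [ih (p ++ [w]) (w + (PySem.List.pyGet? s (-1)).getD 0 - 1),
      ih [w] (w + (PySem.List.pyGet? s (-1)).getD 0 - 1)]
    simp

theorem pvFoldB (ne : List (List Int)) : ∀ (off : Int) (acc : List Int),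
    (∀ s ∈ ne, s ≠ []) →
    (ne.zip (ne.dropLast.foldl
      (fun offs s =>
        offs ++ [(PySem.List.pyGet? offs (-1)).getD 0 + (PySem.List.pyGet? s (-1)).getD 0 - 1])
      [off])).foldl (fun out p => out ++ p.1.map (fun b => b + p.2)) acc
    = acc ++ pvSpec ne off := by
  induction ne with
  | nil => intro off acc _; simp [pvSpec]
  | cons s rest ih =>
    intro off acc hne
    have hs : s ≠ [] := hne s (List.mem_cons_self ..)
    cases rest with
    | nil =>
      simp [pvSpec, if_neg hs]
    | cons r rs =>
      have hdl : (s :: r :: rs).dropLast = s :: (r :: rs).dropLast := rfl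
      rw [hdl]
      simp only [List.foldl_cons]
      have hw : (PySem.List.pyGet? ([off] : List Int) (-1)).getD 0 = off := by
        simpa using pvLastD_concat [] off
      rw [hw]
      rw [pvOffsShift ((r :: rs).dropLast) [off] (off + (PySem.List.pyGet? s (-1)).getD 0 - 1)]
      -- zip (s :: r :: rs) (off :: T) = (s, off) :: zip (r :: rs) T
      simp only [List.cons_append, List.nil_append, List.zip_cons_cons, List.foldl_cons]
      have hoff : off + (PySem.List.pyGet? s (-1)).getD 0 - 1 = pvLastD s + off - 1 := by
        simp [pvLastD]; ring
      rw [hoff, ih (pvLastD s + off - 1) (acc ++ s.map (fun b => b + off))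
        (fun t ht => hne t (List.mem_cons_of_mem _ ht))]
      simp [pvSpec, if_neg hs]

-- ===== VERDICT (by name: the statement is the Claim_ definition above) =====
theorem merge_blocks_across_sessions_spec : Claim_equal_merge_blocks_across_sessions := by
  intro bbs _
  unfold Spec_merge_blocks_across_sessions merge_blocks_across_sessions merge_blocks_across_sessions_alt
  rw [pvFoldA bbs [] 0, List.nil_append]
  rw [pvFoldB (bbs.filter (fun s => decide (s ≠ []))) 0 []
    (fun s hs => by simpa using (List.of_mem_filter hs)), List.nil_append, pvSpec_filter]
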